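-- pv_equiv track=rewrite | github.com/Akshit7103/Sunil-Mahajan-Numerology | main.py | calculate_kua
-- ===== SOURCE A (Python) =====
-- def sum_digits_to_single(num: int) -> int:
--     """Reduce a number to a single digit by repeatedly summing its digits"""
--     while num > 9:
--         num = sum(int(digit) for digit in str(num))
--     return num
--
-- def calculate_kua(year: int, gender: str) -> int:
--     """Calculate kua number based on birth year and gender"""
--     year_sum = sum(int(digit) for digit in str(year))
--     year_digit = sum_digits_to_single(year_sum)
--
--     if gender.lower() == "male":
--         kua = 11 - year_digit
--         # Handle special cases for Kua
--         if kua > 9: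
--             kua = sum_digits_to_single(kua)
--         return kua
--     else:  # female
--         kua = 4 + year_digit
--         if kua > 9:
--             kua = sum_digits_to_single(kua)
--         return kua
-- ===== SOURCE B (Python) =====
-- def calculate_kua(year: int, gender: str) -> int:
--     """Calculate kua number based on birth year and gender (closed-form digital root)."""
--     d = 0 if year == 0 else 1 + (year - 1) % 9
--     if gender.lower() == "male":
--         return 1 + (10 - d) % 9
--     return 1 + (3 + d) % 9
-- ===== Notes on version B (the rewrite author's own statement) =====
-- stated objective: simpler
-- what changed: Replaces the string-of-digits sum plus the iterative sum_digits_to_single reduction loop with a closed-form digital-root formula (1 + (year-1) % 9) and one modular expression per gender branch.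
import Mathlib
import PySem

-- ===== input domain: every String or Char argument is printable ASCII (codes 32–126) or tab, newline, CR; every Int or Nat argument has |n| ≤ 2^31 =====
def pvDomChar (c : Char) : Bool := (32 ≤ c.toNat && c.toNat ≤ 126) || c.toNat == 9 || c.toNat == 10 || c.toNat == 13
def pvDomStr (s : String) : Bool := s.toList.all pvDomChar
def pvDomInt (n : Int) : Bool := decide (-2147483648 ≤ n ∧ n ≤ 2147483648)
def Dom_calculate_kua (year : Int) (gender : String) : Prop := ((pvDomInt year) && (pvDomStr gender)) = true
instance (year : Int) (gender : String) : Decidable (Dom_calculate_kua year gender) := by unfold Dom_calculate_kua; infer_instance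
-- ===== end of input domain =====

-- B replaces A's string digit-sum and iterative single-digit reduction by a closed-form
-- digital-root formula (objective: simpler).

-- ===== PORT A =====
-- int(digit) for a one-character string; Python raises ValueError on a non-digit
-- character, which only happens outside Pre_ (negative year), where the default 0 is never claimed.
def pyIntOfChar (c : Char) : Int := (PySem.Int.ofChars? [c]).getD 0

-- sum(int(digit) for digit in str(num))
def digitSumStr (n : Int) : Int := ((PySem.Int.toChars n).map pyIntOfChar).sum

-- while num > 9: num = sum(int(digit) for digit in str(num)); fuel only makes the loop
-- structurally total — called with fuel = num.toNat, which is enough since num strictly decreases.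
def sum_digits_to_single (fuel : Nat) (num : Int) : Int :=
  match fuel with
  | 0 => num
  | f + 1 => if num > 9 then sum_digits_to_single f (digitSumStr num) else num

def calculate_kua (year : Int) (gender : String) : Int :=
  let year_sum := digitSumStr year
  let year_digit := sum_digits_to_single year_sum.toNat year_sum
  if PySem.Str.lower gender == "male" then
    let kua := 11 - year_digit
    if kua > 9 then sum_digits_to_single kua.toNat kua else kua
  else
    let kua := 4 + year_digit
    if kua > 9 then sum_digits_to_single kua.toNat kua else kua

-- ===== PORT B =====
def calculate_kua_alt (year : Int) (gender : String) : Int :=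
  let d : Int := if year = 0 then 0 else 1 + PySem.Int.mod (year - 1) 9
  if PySem.Str.lower gender == "male" then 1 + PySem.Int.mod (10 - d) 9
  else 1 + PySem.Int.mod (3 + d) 9

-- ===== PRECONDITION & SPEC =====
-- Pre_ excludes year < 0, where A raises ValueError (int('-') on the sign character of str(year)).
def Pre_calculate_kua (year : Int) (gender : String) : Prop := 0 ≤ year
instance (year : Int) (gender : String) : Decidable (Pre_calculate_kua year gender) := by unfold Pre_calculate_kua; infer_instance
def pvWitness_calculate_kua : Int × String := (1996, "male")

def Spec_calculate_kua (year : Int) (gender : String) (out : Int) : Prop := out = calculate_kua_alt year gender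
instance (year : Int) (gender : String) (out : Int) : Decidable (Spec_calculate_kua year gender out) := by unfold Spec_calculate_kua; infer_instance

-- ===== CLAIM (what is proved, stated in full; the proofs are below) =====
def Claim_equal_calculate_kua : Prop := ∀ (year : Int) (gender : String), Dom_calculate_kua year gender → Pre_calculate_kua year gender → Spec_calculate_kua year gender (calculate_kua year gender)

-- ===== LEMMAS AND PROOFS =====

-- decimal digit sum (proof-side model of A's string digit sum)
def dsum (n : Nat) : Nat := (Nat.digits 10 n).sum

-- digital root (proof-side model of the single-digit reduction / B's closed form)
def drN (n : Nat) : Nat := if n = 0 then 0 else (n - 1) % 9 + 1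

theorem dsum_step (n : Nat) (h : 0 < n) : dsum n = n % 10 + dsum (n / 10) := by
  unfold dsum
  rw [Nat.digits_def' (by norm_num) h]
  simp

theorem dsum_le (n : Nat) : dsum n ≤ n := by
  induction n using Nat.strong_induction_on with
  | _ n ih =>
    rcases Nat.eq_zero_or_pos n with h | h
    · simp [h, dsum]
    · rw [dsum_step n h]
      have := ih (n / 10) (Nat.div_lt_self h (by norm_num))
      omega

theorem dsum_lt (n : Nat) (h : 10 ≤ n) : dsum n < n := by
  rw [dsum_step n (by omega)]
  have := dsum_le (n / 10)
  omega

theorem dsum_pos (n : Nat) (h : 0 < n) : 0 < dsum n := by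
  induction n using Nat.strong_induction_on with
  | _ n ih =>
    rw [dsum_step n h]
    rcases Nat.lt_or_ge n 10 with h10 | h10
    · have : n / 10 = 0 := Nat.div_eq_of_lt h10
      simp [this, dsum]
      omega
    · have := ih (n / 10) (Nat.div_lt_self h (by norm_num)) (by omega)
      omega

theorem dsum_mod9 (n : Nat) : dsum n % 9 = n % 9 :=
  (Nat.modEq_nine_digits_sum n).symm

theorem drN_dsum (n : Nat) : drN (dsum n) = drN n := by
  rcases Nat.eq_zero_or_pos n with h | h
  · simp [h, dsum]
  · have h1 := dsum_pos n h
    have h2 := dsum_mod9 n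
    unfold drN
    rw [if_neg (Nat.pos_iff_ne_zero.mp h1), if_neg (Nat.pos_iff_ne_zero.mp h)]
    omega

theorem drN_le (n : Nat) : drN n ≤ 9 := by
  unfold drN; split <;> omega

theorem drN_small (n : Nat) (h : n ≤ 9) : drN n = n := by
  unfold drN; split <;> omega

theorem pyIntOfChar_digitChar : ∀ d : Nat, d < 10 → pyIntOfChar (Nat.digitChar d) = (d : Int) := by
  decide

theorem toDigitsCore_append (b : Nat) :
    ∀ (f n : Nat) (l : List Char), Nat.toDigitsCore b f n l = Nat.toDigitsCore b f n [] ++ l := by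
  intro f
  induction f with
  | zero => intro n l; simp [Nat.toDigitsCore]
  | succ f ih =>
    intro n l
    simp only [Nat.toDigitsCore]
    by_cases h : n / b = 0
    · simp [h]
    · simp only [h, if_false]
      rw [ih (n / b) (Nat.digitChar (n % b) :: l), ih (n / b) [Nat.digitChar (n % b)]]
      simp

theorem sum_toDigitsCore :
    ∀ (f n : Nat), n < f →
      ((Nat.toDigitsCore 10 f n []).map pyIntOfChar).sum = (dsum n : Int) := by
  intro f
  induction f with
  | zero => intro n h; omega
  | succ f ih =>
    intro n h
    simp only [Nat.toDigitsCore]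
    by_cases h10 : n / 10 = 0
    · have hn : n < 10 := by omega
      have hds : dsum n = n := by
        rcases Nat.eq_zero_or_pos n with h0 | h0
        · simp [h0, dsum]
        · rw [dsum_step n h0, h10]; simp [dsum]; omega
      simp [h10, hds, Nat.mod_eq_of_lt hn]
      exact pyIntOfChar_digitChar n hn
    · have hge : 10 ≤ n := by
        by_contra hc
        exact h10 (Nat.div_eq_of_lt (by omega))
      simp only [h10, if_false]
      rw [toDigitsCore_append 10 f (n / 10) [Nat.digitChar (n % 10)]]
      have hlt : n / 10 < f := by
        have := Nat.div_lt_self (show 0 < n by omega) (show 1 < 10 by norm_num)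
        omega
      rw [List.map_append, List.sum_append, ih (n / 10) hlt]
      rw [dsum_step n (by omega)]
      simp [pyIntOfChar_digitChar (n % 10) (by omega)]
      ring

theorem digitSumStr_natCast (n : Nat) : digitSumStr (n : Int) = (dsum n : Int) := by
  unfold digitSumStr PySem.Int.toChars
  have h1 : ¬ ((n : Int) < 0) := by omega
  simp only [h1, if_false, Int.toNat_natCast]
  unfold Nat.toDigits
  exact sum_toDigitsCore (n + 1) n (Nat.lt_succ_self n)

theorem sds_eq : ∀ (f : Nat) (n : Nat), n ≤ f →
    sum_digits_to_single f (n : Int) = (drN n : Int) := by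
  intro f
  induction f with
  | zero =>
    intro n h
    have : n = 0 := by omega
    simp [this, sum_digits_to_single, drN]
  | succ f ih =>
    intro n h
    simp only [sum_digits_to_single]
    by_cases h9 : (n : Int) > 9
    · have hn : 10 ≤ n := by exact_mod_cast h9
      simp only [h9, if_true]
      rw [digitSumStr_natCast n]
      rw [ih (dsum n) (by have := dsum_lt n hn; omega)]
      rw [drN_dsum n]
    · have hn : n ≤ 9 := by omega
      simp [h9, drN_small n hn]

theorem male_branch (r : Nat) (h : r ≤ 9) :
    (if (11 - (r : Int)) > 9 then sum_digits_to_single (11 - (r : Int)).toNat (11 - (r : Int))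
     else 11 - (r : Int)) = 1 + PySem.Int.mod (10 - (r : Int)) 9 := by
  interval_cases r <;> decide

theorem female_branch (r : Nat) (h : r ≤ 9) :
    (if (4 + (r : Int)) > 9 then sum_digits_to_single (4 + (r : Int)).toNat (4 + (r : Int))
     else 4 + (r : Int)) = 1 + PySem.Int.mod (3 + (r : Int)) 9 := by
  interval_cases r <;> decide

theorem d_eq_drN (n : Nat) :
    (if (n : Int) = 0 then (0 : Int) else 1 + PySem.Int.mod ((n : Int) - 1) 9) = (drN n : Int) := by
  by_cases h0 : n = 0
  · simp [h0, drN]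
  · have hne : ¬ ((n : Int) = 0) := by exact_mod_cast h0
    simp only [hne, if_false]
    rw [PySem.Int.mod_eq_emod_of_pos (by norm_num)]
    have h1 : (n : Int) - 1 = ((n - 1 : Nat) : Int) := by omega
    rw [h1]
    unfold drN
    simp only [h0, if_false]
    omega

-- ===== VERDICT (by name: the statement is the Claim_ definition above) =====
theorem calculate_kua_spec : Claim_equal_calculate_kua := by
  intro year gender _ hpre
  unfold Spec_calculate_kua
  obtain ⟨N, rfl⟩ : ∃ N : Nat, year = (N : Int) := ⟨year.toNat, (Int.toNat_of_nonneg hpre).symm⟩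
  simp only [calculate_kua, calculate_kua_alt]
  rw [digitSumStr_natCast N, Int.toNat_natCast]
  rw [sds_eq (dsum N) (dsum N) le_rfl, drN_dsum N]
  rw [d_eq_drN N]
  by_cases hg : PySem.Str.lower gender == "male"
  · simp only [hg, if_true]
    exact male_branch (drN N) (drN_le N)
  · simp only [hg, Bool.false_eq_true, if_false]
    exact female_branch (drN N) (drN_le N)
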